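-- pv_equiv track=rewrite | github.com/brucerennie/FreeCAD | src/Tools/typing/stubgen/discovery.py | inferred_pymethoddef_module
-- ===== SOURCE A (Python) =====
-- KNOWN_PYMETHODDEF_MODULE_HINTS: dict[tuple[str, str], str] = {
--     ("src/App/ApplicationPy.cpp", "ApplicationPy::Methods"): "FreeCAD",
--     ("src/Base/Console.cpp", "ConsoleSingleton::Methods"): "FreeCAD.Console",
--     ("src/Base/UnitsApiPy.cpp", "UnitsApi::Methods"): "FreeCAD.Units",
--     ("src/Gui/ApplicationPy.cpp", "ApplicationPy::Methods"): "FreeCADGui",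
--     ("src/Gui/Selection/Selection.cpp", "SelectionSingleton::Methods"): "FreeCADGui.Selection",
--     ("src/Main/FreeCADGuiPy.cpp", "FreeCADGui_methods"): "FreeCADGui",
--     ("src/Gui/Application.cpp", "FreeCADGui_methods"): "FreeCADGui",
--     (
--         "src/Mod/Part/Gui/AttacherTexts.cpp",
--         "AttacherGuiPy::Methods",
--     ): "PartGui.AttachEngineResources",
-- }
--
-- def known_module_hint(rel_path: str, table: str) -> str | None:
--     return KNOWN_PYMETHODDEF_MODULE_HINTS.get((rel_path, table))
--
-- def inferred_pymethoddef_module(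
--     rel_path: str,
--     table: str,
--     table_modules: dict[tuple[str, str], str],
-- ) -> str | None:
--     hint = known_module_hint(rel_path, table)
--     if hint:
--         return hint
--
--     candidates = {
--         module_name
--         for (source_path, table_name), module_name in table_modules.items()
--         if source_path == rel_path and table_name == table
--     }
--     if len(candidates) == 1:
--         return next(iter(candidates))
--
--     candidates = {
--         module_name for (_, table_name), module_name in table_modules.items() if table_name == table
--     }
--     if len(candidates) == 1:
--         return next(iter(candidates))
--
--     return None
-- ===== SOURCE B (Python) =====
-- KNOWN_PYMETHODDEF_MODULE_HINTS: dict[tuple[str, str], str] = {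
--     ("src/App/ApplicationPy.cpp", "ApplicationPy::Methods"): "FreeCAD",
--     ("src/Base/Console.cpp", "ConsoleSingleton::Methods"): "FreeCAD.Console",
--     ("src/Base/UnitsApiPy.cpp", "UnitsApi::Methods"): "FreeCAD.Units",
--     ("src/Gui/ApplicationPy.cpp", "ApplicationPy::Methods"): "FreeCADGui",
--     ("src/Gui/Selection/Selection.cpp", "SelectionSingleton::Methods"): "FreeCADGui.Selection",
--     ("src/Main/FreeCADGuiPy.cpp", "FreeCADGui_methods"): "FreeCADGui",
--     ("src/Gui/Application.cpp", "FreeCADGui_methods"): "FreeCADGui",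
--     (
--         "src/Mod/Part/Gui/AttacherTexts.cpp",
--         "AttacherGuiPy::Methods",
--     ): "PartGui.AttachEngineResources",
-- }
--
-- # "more than one distinct module seen" sentinel for the uniqueness state machine
-- _AMB = object()
--
--
-- def _step(state, module_name):
--     """Uniqueness state machine: None -> unique(m) -> _AMB on a second distinct module."""
--     if state is None:
--         return module_name
--     if state is _AMB or state != module_name:
--         return _AMB
--     return state
--
--
-- def inferred_pymethoddef_module(
--     rel_path: str,
--     table: str,
--     table_modules: dict[tuple[str, str], str],
-- ) -> str | None:
--     hint = KNOWN_PYMETHODDEF_MODULE_HINTS.get((rel_path, table))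
--     if hint:
--         return hint
--
--     # No candidate sets: track only whether each match level has seen exactly one
--     # distinct module so far (None = none yet, a string = that unique one, _AMB =
--     # ambiguous), stopping early once both levels are ambiguous.
--     exact = by_table = None
--     for (source_path, table_name), module_name in table_modules.items():
--         if exact is _AMB and by_table is _AMB:
--             break
--         if table_name == table:
--             by_table = _step(by_table, module_name)
--             if source_path == rel_path:
--                 exact = _step(exact, module_name)
--
--     if exact is not None and exact is not _AMB:
--         return exact
--     if by_table is not None and by_table is not _AMB:
--         return by_table
--     return None
-- ===== Notes on version B (the rewrite author's own statement) =====
-- stated objective: alternative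
-- what changed: Instead of materialising A's two candidate sets and testing their sizes, B runs a three-state uniqueness state machine (none-yet / unique module / ambiguous) per match level in a single pass with early termination once both levels are ambiguous, so no set is ever built.
import Mathlib
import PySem

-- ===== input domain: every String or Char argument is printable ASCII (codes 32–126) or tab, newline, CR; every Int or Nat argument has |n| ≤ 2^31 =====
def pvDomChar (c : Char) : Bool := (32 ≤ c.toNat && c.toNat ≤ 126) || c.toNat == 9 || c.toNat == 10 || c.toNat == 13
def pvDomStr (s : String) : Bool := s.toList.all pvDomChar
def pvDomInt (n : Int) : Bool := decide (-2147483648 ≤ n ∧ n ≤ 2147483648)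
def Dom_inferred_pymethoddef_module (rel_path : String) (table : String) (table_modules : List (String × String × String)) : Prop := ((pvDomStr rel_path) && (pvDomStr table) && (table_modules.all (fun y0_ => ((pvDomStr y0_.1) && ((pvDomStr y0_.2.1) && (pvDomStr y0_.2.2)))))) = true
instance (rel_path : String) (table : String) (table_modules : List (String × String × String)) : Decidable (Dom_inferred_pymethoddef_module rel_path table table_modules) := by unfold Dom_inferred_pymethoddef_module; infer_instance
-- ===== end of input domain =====

-- B replaces A's two candidate-set scans by a single-pass three-state uniqueness
-- state machine per match level with early exit once both are ambiguous (objective: alternative).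


-- ===== PORT A =====
-- KNOWN_PYMETHODDEF_MODULE_HINTS (module-level constant, shared by both programs)
def knownPymethoddefModuleHints : PySem.Dict (String × String) String :=
  PySem.Dict.ofList
    [ (("src/App/ApplicationPy.cpp", "ApplicationPy::Methods"), "FreeCAD")
    , (("src/Base/Console.cpp", "ConsoleSingleton::Methods"), "FreeCAD.Console")
    , (("src/Base/UnitsApiPy.cpp", "UnitsApi::Methods"), "FreeCAD.Units")
    , (("src/Gui/ApplicationPy.cpp", "ApplicationPy::Methods"), "FreeCADGui")
    , (("src/Gui/Selection/Selection.cpp", "SelectionSingleton::Methods"), "FreeCADGui.Selection")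
    , (("src/Main/FreeCADGuiPy.cpp", "FreeCADGui_methods"), "FreeCADGui")
    , (("src/Gui/Application.cpp", "FreeCADGui_methods"), "FreeCADGui")
    , (("src/Mod/Part/Gui/AttacherTexts.cpp", "AttacherGuiPy::Methods"), "PartGui.AttachEngineResources") ]

def known_module_hint (rel_path : String) (table : String) : Option String :=
  knownPymethoddefModuleHints.get? (rel_path, table)

def inferred_pymethoddef_module (rel_path : String) (table : String) (table_modules : List (String × String × String)) : Option String :=
  let hint := known_module_hint rel_path table
  -- 'if hint:' — truthy iff hint is a non-empty string
  if (hint.getD "") ≠ "" then hint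
  else
    -- first set comprehension: exact (source_path, table_name) matches
    let candidates : PySem.Set String :=
      PySem.Set.ofList (table_modules.filterMap (fun e =>
        if e.1 == rel_path && e.2.1 == table then some e.2.2 else none))
    if PySem.Set.len candidates == 1 then candidates.head?
    else
      -- second set comprehension: table_name matches only
      let candidates2 : PySem.Set String :=
        PySem.Set.ofList (table_modules.filterMap (fun e =>
          if e.2.1 == table then some e.2.2 else none))
      if PySem.Set.len candidates2 == 1 then candidates2.head?
      else none

-- ===== PORT B =====
-- uniqueness state machine: none-yet / unique m / ambiguous (Python's None / str / _AMB)
inductive PvMode where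
  | empty : PvMode
  | unique : String → PvMode
  | ambiguous : PvMode
deriving DecidableEq, Repr

-- _step
def pvStep : PvMode → String → PvMode
  | .empty, m => .unique m
  | .ambiguous, _ => .ambiguous
  | .unique m, x => if m == x then .unique m else .ambiguous

-- the for-loop with its early break, as structural recursion over the items
def pvScan (rel_path table : String) : List (String × String × String) → PvMode → PvMode → PvMode × PvMode
  | [], exact, by_table => (exact, by_table)
  | e :: rest, exact, by_table =>
    if exact == .ambiguous && by_table == .ambiguous then (exact, by_table)
    else if e.2.1 == table then
      let by_table' := pvStep by_table e.2.2
      let exact' := if e.1 == rel_path then pvStep exact e.2.2 else exact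
      pvScan rel_path table rest exact' by_table'
    else pvScan rel_path table rest exact by_table

def inferred_pymethoddef_module_alt (rel_path : String) (table : String) (table_modules : List (String × String × String)) : Option String :=
  let hint := knownPymethoddefModuleHints.get? (rel_path, table)
  if (hint.getD "") ≠ "" then hint
  else
    let st := pvScan rel_path table table_modules .empty .empty
    match st.1 with
    | .unique m => some m
    | _ =>
      match st.2 with
      | .unique m => some m
      | _ => none

-- ===== PRECONDITION & SPEC =====
def Spec_inferred_pymethoddef_module (rel_path : String) (table : String) (table_modules : List (String × String × String)) (out : Option String) : Prop := out = inferred_pymethoddef_module_alt rel_path table table_modules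
instance (rel_path : String) (table : String) (table_modules : List (String × String × String)) (out : Option String) : Decidable (Spec_inferred_pymethoddef_module rel_path table table_modules out) := by unfold Spec_inferred_pymethoddef_module; infer_instance

-- ===== CLAIM =====
def Claim_equal_inferred_pymethoddef_module : Prop := ∀ (rel_path : String) (table : String) (table_modules : List (String × String × String)), Dom_inferred_pymethoddef_module rel_path table table_modules → Spec_inferred_pymethoddef_module rel_path table table_modules (inferred_pymethoddef_module rel_path table table_modules)

-- ===== LEMMAS AND PROOFS =====

-- once ambiguous, folding pvStep stays ambiguous (the early break changes nothing)
theorem pv_fold_amb (xs : List String) : xs.foldl pvStep .ambiguous = .ambiguous := by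
  induction xs with
  | nil => rfl
  | cons x rest ih => simpa [pvStep] using ih

-- the scan (with early exit) computes the pvStep-folds of A's two filtered candidate lists
theorem pv_scan_eq (rel_path table : String) (tm : List (String × String × String))
    (es ts : PvMode) :
    pvScan rel_path table tm es ts
    = ((tm.filterMap (fun e => if e.1 == rel_path && e.2.1 == table then some e.2.2 else none)).foldl pvStep es,
       (tm.filterMap (fun e => if e.2.1 == table then some e.2.2 else none)).foldl pvStep ts) := by
  induction tm generalizing es ts with
  | nil => rfl
  | cons e rest ih =>
    simp only [pvScan]
    by_cases hab : (es == PvMode.ambiguous && ts == PvMode.ambiguous) = true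
    · rw [if_pos hab]
      simp only [Bool.and_eq_true, beq_iff_eq] at hab
      obtain ⟨he, ht⟩ := hab
      subst he ht
      simp only [List.filterMap_cons]
      cases hx : (if e.1 == rel_path && e.2.1 == table then some e.2.2 else none) <;>
        cases hy : (if e.2.1 == table then some e.2.2 else none) <;>
          simp [pv_fold_amb, pvStep]
    · rw [if_neg hab]
      by_cases h2 : (e.2.1 == table) = true
      · rw [if_pos h2, ih]
        by_cases h1 : (e.1 == rel_path) = true
        · have hp1 : e.1 = rel_path := by simpa using h1
          have hp2 : e.2.1 = table := by simpa using h2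
          simp [hp1, hp2]
        · have hp1 : ¬ e.1 = rel_path := by simpa using h1
          have hp2 : e.2.1 = table := by simpa using h2
          simp [hp1, hp2]
      · rw [if_neg h2, ih]
        have hp2 : ¬ e.2.1 = table := by simpa using h2
        simp [hp2]

-- the invariant tying a state-machine state to the candidate set built so far
def pvGood : PvMode → List String → Prop
  | .empty, l => l = []
  | .unique m, l => l = [m]
  | .ambiguous, l => 2 ≤ l.length

theorem pv_step_good (s : PvMode) (l : List String) (x : String) (h : pvGood s l) :
    pvGood (pvStep s x) (PySem.Set.add l x) := by
  cases s with
  | empty => simp [pvGood] at h; subst h; simp [pvStep, pvGood, PySem.Set.add]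
  | unique m =>
    simp [pvGood] at h; subst h
    by_cases hx : m == x
    · simp [pvStep, PySem.Set.add, PySem.Set.contains, eq_of_beq hx, pvGood]
    · have : ¬ x ∈ [m] := by simpa [eq_comm] using (by simpa using hx : ¬ m = x)
      simp [pvStep, hx, PySem.Set.add_of_not_mem this, pvGood]
  | ambiguous =>
    simp only [pvGood] at h
    show 2 ≤ (PySem.Set.add l x).length
    rw [PySem.Set.add_eq_ite]
    split
    · exact h
    · simp only [List.length_append, List.length_cons, List.length_nil]
      omega

theorem pv_fold_good (xs : List String) (s : PvMode) (l : List String) (h : pvGood s l) :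
    pvGood (xs.foldl pvStep s) (xs.foldl PySem.Set.add l) := by
  induction xs generalizing s l with
  | nil => exact h
  | cons x rest ih => exact ih _ _ (pv_step_good s l x h)

-- given the invariant, A's 'len == 1 → head' test equals B's match on the state
theorem pv_sel (s : PvMode) (l : List String) (h : pvGood s l) (k : Option String) :
    (if PySem.Set.len l == 1 then l.head? else k)
    = (match s with | .unique m => some m | _ => k) := by
  cases s with
  | empty => simp [pvGood] at h; subst h; simp [PySem.Set.len]
  | unique m => simp [pvGood] at h; subst h; simp [PySem.Set.len]
  | ambiguous =>
    simp only [pvGood] at h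
    have hlen : ¬ (PySem.Set.len l == 1) = true := by
      simp only [PySem.Set.len, beq_iff_eq]
      intro hc
      omega
    rw [if_neg hlen]

-- ===== VERDICT =====
theorem inferred_pymethoddef_module_spec : Claim_equal_inferred_pymethoddef_module := by
  intro rel_path table tm _
  unfold Spec_inferred_pymethoddef_module inferred_pymethoddef_module inferred_pymethoddef_module_alt
  simp only [known_module_hint]
  by_cases hh : ((knownPymethoddefModuleHints.get? (rel_path, table)).getD "") ≠ ""
  · rw [if_pos hh, if_pos hh]
  · rw [if_neg hh, if_neg hh, pv_scan_eq]
    have g1 := pv_fold_good (tm.filterMap (fun e => if e.1 == rel_path && e.2.1 == table then some e.2.2 else none)) .empty [] rfl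
    have g2 := pv_fold_good (tm.filterMap (fun e => if e.2.1 == table then some e.2.2 else none)) .empty [] rfl
    simp only [PySem.Set.ofList_eq_foldl]
    revert g1 g2
    generalize (tm.filterMap (fun e => if e.1 == rel_path && e.2.1 == table then some e.2.2 else none)).foldl pvStep PvMode.empty = s1
    generalize (tm.filterMap (fun e => if e.1 == rel_path && e.2.1 == table then some e.2.2 else none)).foldl PySem.Set.add [] = l1
    generalize (tm.filterMap (fun e => if e.2.1 == table then some e.2.2 else none)).foldl pvStep PvMode.empty = s2
    generalize (tm.filterMap (fun e => if e.2.1 == table then some e.2.2 else none)).foldl PySem.Set.add [] = l2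
    intro g1 g2
    rw [pv_sel _ _ g1, pv_sel _ _ g2]
    cases s1 <;> cases s2 <;> rfl
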